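-- pv_equiv track=rewrite | github.com/PN-CourseWork/LSM-P2 | Experiments/02-decomposition/plot_decompositions.py | compute_dims
-- ===== SOURCE A (Python) =====
-- def compute_dims(size: int, ndims: int = 3) -> list[int]:
--     """Compute optimal processor grid dimensions (like MPI.Compute_dims).
--
--     Factorizes size into ndims factors as evenly as possible.
--     """
--     dims = [1] * ndims
--     remaining = size
--     primes = []
--     n = remaining
--     d = 2
--     while d * d <= n:
--         while n % d == 0:
--             primes.append(d)
--             n //= d
--         d += 1
--     if n > 1:
--         primes.append(n)
--
--     primes.sort(reverse=True)
--     for p in primes: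
--         min_idx = dims.index(min(dims))
--         dims[min_idx] *= p
--
--     return sorted(dims, reverse=True)
-- ===== SOURCE B (Python) =====
-- def _factor(n, d):
--     """Prime factors of n (ascending): scan divisors, recurse on each division."""
--     while d * d <= n:
--         if n % d == 0:
--             return [d] + _factor(n // d, d)
--         d += 1
--     return [n] if n > 1 else []
--
--
-- def _merge(a, b):
--     """Skew-heap merge; a node is (value, left, right), an empty heap is None."""
--     if a is None:
--         return b
--     if b is None:
--         return a
--     if b[0] < a[0]:
--         a, b = b, a
--     return (a[0], _merge(a[2], b), a[1])
--
--
-- def compute_dims(size: int, ndims: int = 3) -> list[int]: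
--     """Compute optimal processor grid dimensions (like MPI.Compute_dims).
--
--     Factorizes size into ndims factors as evenly as possible.
--     """
--     primes = sorted(_factor(size, 2), reverse=True)
--     heap = None
--     for _ in range(ndims):
--         heap = _merge(heap, (1, None, None))
--     for p in primes:
--         v, l, r = heap
--         heap = _merge(_merge(l, r), (v * p, None, None))
--     out = []
--     while heap is not None:
--         v, l, r = heap
--         out.append(v)
--         heap = _merge(l, r)
--     return out[::-1]
-- ===== Notes on version B (the rewrite author's own statement) =====
-- stated objective: alternative
-- what changed: Factorization becomes a recursion on each found factor instead of A's nested while loops, and the greedy assignment loop (rescan dims with min()+list.index(), write in place, final sort) is replaced by a skew-heap priority queue: pop the root, push root*prime back via merge, and drain the heap in ascending order instead of sorting at the end.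
import Mathlib
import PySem

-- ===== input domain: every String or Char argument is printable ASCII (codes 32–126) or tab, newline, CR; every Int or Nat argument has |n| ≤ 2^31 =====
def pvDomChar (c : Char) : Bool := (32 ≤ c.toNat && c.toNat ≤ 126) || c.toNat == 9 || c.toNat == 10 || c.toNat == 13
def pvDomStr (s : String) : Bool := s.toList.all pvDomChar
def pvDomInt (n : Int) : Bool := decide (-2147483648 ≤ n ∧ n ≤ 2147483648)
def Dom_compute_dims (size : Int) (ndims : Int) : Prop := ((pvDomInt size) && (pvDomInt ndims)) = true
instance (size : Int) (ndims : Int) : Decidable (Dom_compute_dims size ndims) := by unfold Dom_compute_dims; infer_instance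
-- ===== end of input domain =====

-- B replaces A's nested-while factorization by a recursion and A's greedy loop (rescan dims with
-- min()+index(), write in place, final sort) by a skew-heap priority queue drained in order; same results.

-- ===== PORT A =====
-- termination facts for the trial-division loops (cited by name in decreasing_by)
theorem pvDivTerm (n d : Int) (h2 : 2 ≤ d) (hdd : d * d ≤ n) :
    (PySem.Int.floordiv n d).toNat < n.toNat := by
  have h3 : 2 * d ≤ d * d := mul_le_mul_of_nonneg_right h2 (by omega)
  have heq := PySem.Int.floordiv_eq_ediv_of_pos (a := n) (b := d) (by omega)
  have hlt : n / d < n := by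
    rw [Int.ediv_lt_iff_lt_mul (by omega)]
    have h4 : n * 2 ≤ n * d := mul_le_mul_of_nonneg_left h2 (by omega)
    omega
  rw [heq]; omega

theorem pvSqTerm (n : Int) (k : Nat) (hd : ((k : Int) + 2) * ((k : Int) + 2) ≤ n) :
    n.toNat - (k + 1) < n.toNat - k := by
  have h2 : (2 : Int) ≤ (k : Int) + 2 := by omega
  have h3 : 2 * ((k : Int) + 2) ≤ ((k : Int) + 2) * ((k : Int) + 2) :=
    mul_le_mul_of_nonneg_right h2 (by omega)
  omega

-- A's trial division: while d*d <= n: while n % d == 0: primes.append(d); n //= d ;; d += 1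
-- d starts at 2 and only increases, represented as d = k + 2 with k : Nat
def pvFactorGo (n : Int) (k : Nat) (acc : List Int) : List Int × Int :=
  if hd : ((k : Int) + 2) * ((k : Int) + 2) ≤ n then
    if PySem.Int.mod n ((k : Int) + 2) = 0 then
      pvFactorGo (PySem.Int.floordiv n ((k : Int) + 2)) k (acc ++ [(k : Int) + 2])
    else
      pvFactorGo n (k + 1) acc
  else
    (acc, n)
termination_by (n.toNat, n.toNat - k)
decreasing_by
  · exact Prod.Lex.left _ _ (pvDivTerm n ((k : Int) + 2) (by omega) hd)
  · exact Prod.Lex.right _ (pvSqTerm n k hd)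

def pvFactorize (size : Int) : List Int :=
  let r := pvFactorGo size 0 []
  if r.2 > 1 then r.1 ++ [r.2] else r.1

def compute_dims (size : Int) (ndims : Int) : List Int :=
  let dims := List.replicate ndims.toNat (1 : Int)   -- [1] * ndims ([] for ndims ≤ 0, as in Python)
  let primes := PySem.List.sorted (pvFactorize size) (fun x => x) true
  let dims := primes.foldl (fun (dims : List Int) (p : Int) =>
    match PySem.List.min? dims (fun x => x) with
    | none => dims        -- Python: min([]) raises ValueError; excluded by Pre_compute_dims
    | some m =>
      let min_idx := (PySem.List.index? dims m).getD 0
      dims.set min_idx ((dims.getD min_idx 0) * p)) dims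
  PySem.List.sorted dims (fun x => x) true

-- ===== PORT B =====
-- _factor(n, d): recursive trial division, d = k + 2 with k : Nat (d starts at 2 and only grows)
def pvFactB (n : Int) (k : Nat) : List Int :=
  if hd : ((k : Int) + 2) * ((k : Int) + 2) ≤ n then
    if PySem.Int.mod n ((k : Int) + 2) = 0 then
      ((k : Int) + 2) :: pvFactB (PySem.Int.floordiv n ((k : Int) + 2)) k
    else
      pvFactB n (k + 1)
  else
    if n > 1 then [n] else []
termination_by (n.toNat, n.toNat - k)
decreasing_by
  · exact Prod.Lex.left _ _ (pvDivTerm n ((k : Int) + 2) (by omega) hd)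
  · exact Prod.Lex.right _ (pvSqTerm n k hd)

-- a skew-heap node (value, left, right); PvHeap.leaf is Python's None
inductive PvHeap : Type where
  | leaf : PvHeap
  | node : Int → PvHeap → PvHeap → PvHeap
deriving DecidableEq, Repr

def pvHeapSize : PvHeap → Nat
  | .leaf => 0
  | .node _ l r => pvHeapSize l + pvHeapSize r + 1

-- _merge(a, b)
def pvMerge : PvHeap → PvHeap → PvHeap
  | .leaf, b => b
  | .node va la ra, .leaf => .node va la ra
  | .node va la ra, .node vb lb rb =>
    if vb < va then .node vb (pvMerge rb (.node va la ra)) lb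
    else .node va (pvMerge ra (.node vb lb rb)) la
termination_by a b => pvHeapSize a + pvHeapSize b
decreasing_by
  all_goals (simp [pvHeapSize]; try omega)

-- the final while loop: pop the root, merge the children, collect ascending.
-- Ported with explicit fuel (= the heap's size, exactly the number of pops) as a pure
-- totality guard; pvDrainGo_perm below shows the fuel is always sufficient.
def pvDrainGo : Nat → PvHeap → List Int
  | 0, _ => []
  | _, .leaf => []
  | fuel + 1, .node v l r => v :: pvDrainGo fuel (pvMerge l r)

def pvDrain (h : PvHeap) : List Int := pvDrainGo (pvHeapSize h) h

def compute_dims_alt (size : Int) (ndims : Int) : List Int :=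
  let primes := PySem.List.sorted (pvFactB size 0) (fun x => x) true
  let heap := (List.range ndims.toNat).foldl
    (fun (h : PvHeap) _ => pvMerge h (.node 1 .leaf .leaf)) .leaf   -- for _ in range(ndims)
  let heap := primes.foldl (fun (h : PvHeap) (p : Int) =>
    match h with
    | .leaf => .leaf   -- Python: unpacking None raises TypeError; excluded by Pre_compute_dims
    | .node v l r => pvMerge (pvMerge l r) (.node (v * p) .leaf .leaf)) heap
  (PySem.List.slice? (pvDrain heap) none none (-1)).getD []   -- out[::-1]

-- ===== PRECONDITION & SPEC =====
-- Pre_ excludes exactly the inputs where A raises: ndims ≤ 0 together with size ≥ 2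
-- (A's min([]) raises ValueError there; B's tuple-unpacking of None raises TypeError there).
def Pre_compute_dims (size : Int) (ndims : Int) : Prop := 2 ≤ size → 1 ≤ ndims
instance (size : Int) (ndims : Int) : Decidable (Pre_compute_dims size ndims) := by
  unfold Pre_compute_dims; infer_instance

def pvWitness_compute_dims : Int × Int := (12, 3)

def Spec_compute_dims (size : Int) (ndims : Int) (out : List Int) : Prop := out = compute_dims_alt size ndims
instance (size : Int) (ndims : Int) (out : List Int) : Decidable (Spec_compute_dims size ndims out) := by unfold Spec_compute_dims; infer_instance

-- ===== CLAIM (what is proved, stated in full; the proofs are below) =====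
def Claim_equal_compute_dims : Prop := ∀ (size : Int) (ndims : Int), Dom_compute_dims size ndims → Pre_compute_dims size ndims → Spec_compute_dims size ndims (compute_dims size ndims)

-- ===== LEMMAS AND PROOFS =====

theorem pvHeapSize_merge (a b : PvHeap) :
    pvHeapSize (pvMerge a b) = pvHeapSize a + pvHeapSize b := by
  fun_induction pvMerge a b with
  | case1 b => simp [pvHeapSize]
  | case2 va la ra => simp [pvHeapSize]
  | case3 va la ra vb lb rb h ih => simp [pvHeapSize, ih]; omega
  | case4 va la ra vb lb rb h ih => simp [pvHeapSize, ih]; omega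

-- the two factorizations produce the SAME list of primes
theorem pvFactorGo_eq_pvFactB (n : Int) (k : Nat) (acc : List Int) :
    (pvFactorGo n k acc).1 ++
      (if (pvFactorGo n k acc).2 > 1 then [(pvFactorGo n k acc).2] else []) =
    acc ++ pvFactB n k := by
  fun_induction pvFactorGo n k acc with
  | case1 n k acc hd hm ih =>
    rw [pvFactB.eq_def, dif_pos hd, if_pos hm]
    rw [ih]; simp
  | case2 n k acc hd hm ih =>
    rw [pvFactB.eq_def, dif_pos hd, if_neg hm]
    exact ih
  | case3 n k acc hd =>
    rw [pvFactB.eq_def, dif_neg hd]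

theorem pvFactorize_eq (size : Int) : pvFactorize size = pvFactB size 0 := by
  have h := pvFactorGo_eq_pvFactB size 0 []
  unfold pvFactorize
  simp only [List.nil_append] at h
  dsimp only
  split <;> simp_all

theorem pvFactB_of_le_one (size : Int) (h : size ≤ 1) : pvFactB size 0 = [] := by
  rw [pvFactB.eq_def]
  have hno : ¬ (((0 : Nat) : Int) + 2) * (((0 : Nat) : Int) + 2) ≤ size := by push_cast; omega
  simp only [hno, dite_false]
  rw [if_neg (by omega)]

-- multiset contents of a heap
def pvContents : PvHeap → List Int
  | .leaf => []
  | .node v l r => v :: (pvContents l ++ pvContents r)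

theorem pvContents_merge (a b : PvHeap) :
    (pvContents (pvMerge a b)).Perm (pvContents a ++ pvContents b) := by
  fun_induction pvMerge a b with
  | case1 b => simp [pvContents]
  | case2 va la ra => simp [pvContents]
  | case3 va la ra vb lb rb h ih =>
    refine List.perm_iff_count.mpr (fun x => ?_)
    have := ih.count_eq x
    simp [pvContents, List.count_append, List.count_cons] at *
    omega
  | case4 va la ra vb lb rb h ih =>
    refine List.perm_iff_count.mpr (fun x => ?_)
    have := ih.count_eq x
    simp [pvContents, List.count_append, List.count_cons] at *
    omega

-- heap order: the value at every node is ≤ everything below it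
def pvIsHeap : PvHeap → Prop
  | .leaf => True
  | .node v l r => (∀ x ∈ pvContents l ++ pvContents r, v ≤ x) ∧ pvIsHeap l ∧ pvIsHeap r

theorem pvRoot_le (v : Int) (l r : PvHeap) (h : pvIsHeap (.node v l r)) :
    ∀ x ∈ pvContents (.node v l r), v ≤ x := by
  intro x hx
  rcases List.mem_cons.mp hx with rfl | hx
  · exact le_refl x
  · exact h.1 x hx

theorem pvIsHeap_merge (a b : PvHeap) (ha : pvIsHeap a) (hb : pvIsHeap b) :
    pvIsHeap (pvMerge a b) := by
  fun_induction pvMerge a b with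
  | case1 b => exact hb
  | case2 va la ra => exact ha
  | case3 va la ra vb lb rb h ih =>
    refine ⟨?_, ih hb.2.2 ha, hb.2.1⟩
    intro x hx
    rcases List.mem_append.mp hx with hx | hx
    · have := (pvContents_merge rb (.node va la ra)).mem_iff.mp hx
      rcases List.mem_append.mp this with hx | hx
      · exact hb.1 x (List.mem_append.mpr (Or.inr hx))
      · exact le_trans (le_of_lt h) (pvRoot_le va la ra ha x hx)
    · exact hb.1 x (List.mem_append.mpr (Or.inl hx))
  | case4 va la ra vb lb rb h ih =>
    refine ⟨?_, ih ha.2.2 hb, ha.2.1⟩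
    intro x hx
    rcases List.mem_append.mp hx with hx | hx
    · have := (pvContents_merge ra (.node vb lb rb)).mem_iff.mp hx
      rcases List.mem_append.mp this with hx | hx
      · exact ha.1 x (List.mem_append.mpr (Or.inr hx))
      · exact le_trans (by omega) (pvRoot_le vb lb rb hb x hx)
    · exact ha.1 x (List.mem_append.mpr (Or.inl hx))

theorem pvDrainGo_perm : ∀ (fuel : Nat) (h : PvHeap), pvHeapSize h ≤ fuel →
    (pvDrainGo fuel h).Perm (pvContents h) := by
  intro fuel
  induction fuel with
  | zero =>
    intro h hle
    cases h with
    | leaf => simp [pvDrainGo, pvContents]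
    | node v l r => simp [pvHeapSize] at hle
  | succ n ih =>
    intro h hle
    cases h with
    | leaf => simp [pvDrainGo, pvContents]
    | node v l r =>
      simp only [pvDrainGo, pvContents]
      refine ((ih _ ?_).trans (pvContents_merge l r)).cons v
      simp only [pvHeapSize] at hle
      simp [pvHeapSize_merge]; omega

theorem pvDrain_perm (h : PvHeap) : (pvDrain h).Perm (pvContents h) :=
  pvDrainGo_perm _ h (le_refl _)

theorem pvDrainGo_pairwise : ∀ (fuel : Nat) (h : PvHeap), pvHeapSize h ≤ fuel → pvIsHeap h →
    (pvDrainGo fuel h).Pairwise (· ≤ ·) := by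
  intro fuel
  induction fuel with
  | zero => intro h _ _; cases h <;> simp [pvDrainGo]
  | succ n ih =>
    intro h hle hh
    cases h with
    | leaf => simp [pvDrainGo]
    | node v l r =>
      simp only [pvDrainGo]
      have hsz : pvHeapSize (pvMerge l r) ≤ n := by
        simp only [pvHeapSize] at hle
        simp [pvHeapSize_merge]; omega
      refine List.pairwise_cons.mpr ⟨?_, ih _ hsz (pvIsHeap_merge l r hh.2.1 hh.2.2)⟩
      intro y hy
      have hy' := ((pvDrainGo_perm n _ hsz).trans (pvContents_merge l r)).mem_iff.mp hy
      exact hh.1 y hy'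

theorem pvDrain_pairwise (h : PvHeap) (hh : pvIsHeap h) : (pvDrain h).Pairwise (· ≤ ·) :=
  pvDrainGo_pairwise _ h (le_refl _) hh

-- element at the first-occurrence index is the element itself
theorem getD_index?_self (dims : List Int) (m : Int) (hm : m ∈ dims) :
    dims.getD ((PySem.List.index? dims m).getD 0) 0 = m := by
  induction dims with
  | nil => cases hm
  | cons x t ih =>
    by_cases hx : x = m
    · subst hx; rw [PySem.List.index?_cons_self]; simp
    · have hmt : m ∈ t := (List.mem_cons.mp hm).resolve_left (fun h => hx h.symm)
      obtain ⟨k, hk⟩ := Option.isSome_iff_exists.mp ((PySem.List.index?_isSome_iff t m).mpr hmt)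
      rw [PySem.List.index?_cons_of_ne t hx, hk]
      simp only [Option.map_some, Option.getD_some, List.getD_cons_succ]
      have h1 := ih hmt
      rw [hk] at h1
      simpa using h1

-- writing y at the first occurrence of m is, up to permutation, erasing m and consing y
theorem set_index?_perm (dims : List Int) (m y : Int) (hm : m ∈ dims) :
    (dims.set ((PySem.List.index? dims m).getD 0) y).Perm (y :: dims.erase m) := by
  induction dims with
  | nil => cases hm
  | cons x t ih =>
    by_cases hx : x = m
    · subst hx; rw [PySem.List.index?_cons_self]
      simp [List.erase_cons_head]
    · have hmt : m ∈ t := (List.mem_cons.mp hm).resolve_left (fun h => hx h.symm)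
      obtain ⟨k, hk⟩ := Option.isSome_iff_exists.mp ((PySem.List.index?_isSome_iff t m).mpr hmt)
      rw [PySem.List.index?_cons_of_ne t hx, hk]
      simp only [Option.map_some, Option.getD_some]
      rw [List.erase_cons_tail (by simpa using hx)]
      have hset : (x :: t).set (k + 1) y = x :: t.set k y := rfl
      rw [hset]
      have h1 := ih hmt
      rw [hk] at h1
      simp only [Option.getD_some] at h1
      exact (h1.cons x).trans (List.Perm.swap y x (t.erase m))

-- the initial heap built by ndims merges of a singleton
theorem pvInit_heap (n : Nat) :
    (pvContents ((List.range n).foldl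
        (fun (h : PvHeap) _ => pvMerge h (.node 1 .leaf .leaf)) .leaf)).Perm
      (List.replicate n (1 : Int)) ∧
    pvIsHeap ((List.range n).foldl
        (fun (h : PvHeap) _ => pvMerge h (.node 1 .leaf .leaf)) .leaf) := by
  induction n with
  | zero => exact ⟨by simp [pvContents], trivial⟩
  | succ n ih =>
    rw [List.range_succ, List.foldl_append]
    simp only [List.foldl_cons, List.foldl_nil]
    constructor
    · refine (pvContents_merge _ _).trans ?_
      rw [List.replicate_succ']
      exact ih.1.append (by simp [pvContents])
    · refine pvIsHeap_merge _ _ ih.2 ?_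
      exact ⟨by simp [pvContents], trivial, trivial⟩

-- the loop invariant: the heap's contents stay a permutation of A's dims, and the heap stays ordered
theorem pv_loop (ps : List Int) : ∀ (dims : List Int) (heap : PvHeap),
    (pvContents heap).Perm dims → pvIsHeap heap → dims ≠ [] →
    (pvContents (ps.foldl (fun (h : PvHeap) (p : Int) =>
        match h with
        | .leaf => .leaf
        | .node v l r => pvMerge (pvMerge l r) (.node (v * p) .leaf .leaf)) heap)).Perm
      (ps.foldl (fun (dims : List Int) (p : Int) =>
        match PySem.List.min? dims (fun x => x) with
        | none => dims
        | some m =>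
          let min_idx := (PySem.List.index? dims m).getD 0
          dims.set min_idx ((dims.getD min_idx 0) * p)) dims) ∧
    pvIsHeap (ps.foldl (fun (h : PvHeap) (p : Int) =>
        match h with
        | .leaf => .leaf
        | .node v l r => pvMerge (pvMerge l r) (.node (v * p) .leaf .leaf)) heap) := by
  induction ps with
  | nil => exact fun dims heap hperm hheap _ => ⟨hperm, hheap⟩
  | cons p ps ih =>
    intro dims heap hperm hheap hdne
    obtain ⟨v, l, r, rfl⟩ : ∃ v l r, heap = PvHeap.node v l r := by
      cases heap with
      | leaf =>
        simp only [pvContents] at hperm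
        exact absurd hperm.nil_eq.symm hdne
      | node v l r => exact ⟨v, l, r, rfl⟩
    obtain ⟨m, hmin⟩ : ∃ m, PySem.List.min? dims (fun x => x) = some m := by
      cases hmin : PySem.List.min? dims (fun x => x) with
      | none => exact absurd ((PySem.List.min?_eq_none_iff dims (fun x => x)).mp hmin) hdne
      | some m => exact ⟨m, rfl⟩
    have hmmem : m ∈ dims := PySem.List.min?_mem hmin
    -- the heap root v is exactly A's min m
    have hvm : m = v := by
      have h1 : m ≤ v := PySem.List.min?_isMin hmin v (hperm.mem_iff.mp (List.mem_cons_self))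
      have h2 : v ≤ m := pvRoot_le v l r hheap m (hperm.mem_iff.mpr hmmem)
      omega
    subst hvm
    simp only [List.foldl_cons, hmin]
    apply ih
    · -- contents of the new heap ~ A's new dims
      have hA : (dims.set ((PySem.List.index? dims m).getD 0)
          ((dims.getD ((PySem.List.index? dims m).getD 0) 0) * p)).Perm ((m * p) :: dims.erase m) := by
        rw [getD_index?_self dims m hmmem]
        exact set_index?_perm dims m (m * p) hmmem
      have hrest : (dims.erase m).Perm (pvContents l ++ pvContents r) := by
        have h1 := (hperm.symm).erase m
        simp only [pvContents, List.erase_cons_head] at h1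
        exact h1
      refine ((pvContents_merge _ _).trans ?_).trans hA.symm
      have h2 : (pvContents (pvMerge l r) ++ pvContents (PvHeap.node (m * p) .leaf .leaf)).Perm
          ((pvContents l ++ pvContents r) ++ [m * p]) := by
        exact (pvContents_merge l r).append (by simp [pvContents])
      refine h2.trans ?_
      refine ((List.perm_append_comm).trans ?_)
      exact (hrest.symm.cons (m * p))
    · refine pvIsHeap_merge _ _ (pvIsHeap_merge l r hheap.2.1 hheap.2.2) ?_
      exact ⟨by simp [pvContents], trivial, trivial⟩
    · intro h0
      have hlen := congrArg List.length h0
      simp [List.length_set] at hlen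
      exact hdne hlen

-- ===== VERDICT (by name: the statement is the Claim_ definition above) =====
theorem compute_dims_spec : Claim_equal_compute_dims := by
  intro size ndims _dom hpre
  simp only [Spec_compute_dims, compute_dims, compute_dims_alt, pvFactorize_eq,
    PySem.List.slice?_none_none_neg_one, Option.getD_some]
  by_cases hn : ndims.toNat = 0
  · -- ndims ≤ 0: Pre_ forces size ≤ 1, so there are no primes; both sides are []
    have hsz : size ≤ 1 := by
      by_contra h
      have := hpre (by omega)
      omega
    rw [pvFactB_of_le_one size hsz]
    simp [hn, PySem.List.sorted, pvDrain]
    rfl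
  · have hne : (List.replicate ndims.toNat (1 : Int)) ≠ [] := by
      cases h : ndims.toNat with
      | zero => exact absurd h hn
      | succ k => simp
    obtain ⟨hinitp, hinith⟩ := pvInit_heap ndims.toNat
    obtain ⟨hperm, hheap⟩ := pv_loop (PySem.List.sorted (pvFactB size 0) (fun x => x) true)
      (List.replicate ndims.toNat 1) _ hinitp hinith hne
    -- both final lists are ≥-sorted permutations of the same multiset
    apply List.Perm.eq_of_pairwise (le := fun a b : Int => b ≤ a)
    · intro a b _ _ h1 h2; omega
    · exact PySem.List.sorted_pairwise_rev _ _
    · exact List.pairwise_reverse.mpr (by simpa using pvDrain_pairwise _ hheap)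
    · exact (PySem.List.sorted_perm _ _ _).trans
        (((pvDrain_perm _).trans hperm).symm.trans (List.reverse_perm _).symm)
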